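-- pv_equiv track=rewrite | github.com/shaoshitong/Auto_Snn | lib/GRU.py | numeric_get
-- ===== SOURCE A (Python) =====
-- def numeric_get(x, y, b):
--     tensor_check = [[0 for i in range(y)] for j in range(x)]
--     for i in range(1, x):
--         tensor_check[i][0] = tensor_check[i - 1][0] + int(not (abs(i - 0) < b))
--     for i in range(1, y):
--         tensor_check[0][i] = tensor_check[0][i - 1] + int(not (abs(i - 0) < b))
--     for i in range(1, x):
--         for j in range(1, y):
--             tensor_check[i][j] = tensor_check[i][j - 1] + tensor_check[i - 1][j] - tensor_check[i - 1][j - 1] + int(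
--                 not (abs(i - j) < b))
--     return tensor_check
-- ===== SOURCE B (Python) =====
-- def numeric_get(x, y, b):
--     # Build the indicator matrix, then prefix-sum it in two directional sweeps
--     # (row-wise cumsum per row, then a running column accumulator).
--     # Intended difference from the original: for b <= 0 the origin cell (0,0)
--     # counts as 1 (|0-0| >= b), which the original accidentally leaves out.
--     def prefix(row):
--         out = []
--         s = 0
--         for v in row:
--             s += v
--             out.append(s)
--         return out
--
--     ind = [[int(abs(i - j) >= b) for j in range(y)] for i in range(x)]
--     rows = [prefix(r) for r in ind]
--     acc = [0] * max(y, 0)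
--     out = []
--     for r in rows:
--         acc = [a + v for a, v in zip(acc, r)]
--         out.append(acc)
--     return out
-- ===== Notes on version B (the rewrite author's own statement) =====
-- stated objective: simpler
-- what changed: Replaces A's fused inclusion-exclusion prefix-sum recurrence with its two special boundary loops by build-the-indicator-matrix then two directional cumulative sweeps (row-wise prefix sums, then a running column accumulator).
-- intended difference: When b <= 0 and the table is nonempty (x>=1, y>=1), A leaves cell (0,0) at 0 because its loops never write it, so every entry of its table omits the origin pair; B counts |0-0| >= b there, giving the intended 2D prefix sum of the indicator (witness (1,1,0): A returns [[0]], B returns [[1]]). — e.g. on numeric_get(1, 1, 0): A returns [[0]], B returns [[1]]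
import Mathlib
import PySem

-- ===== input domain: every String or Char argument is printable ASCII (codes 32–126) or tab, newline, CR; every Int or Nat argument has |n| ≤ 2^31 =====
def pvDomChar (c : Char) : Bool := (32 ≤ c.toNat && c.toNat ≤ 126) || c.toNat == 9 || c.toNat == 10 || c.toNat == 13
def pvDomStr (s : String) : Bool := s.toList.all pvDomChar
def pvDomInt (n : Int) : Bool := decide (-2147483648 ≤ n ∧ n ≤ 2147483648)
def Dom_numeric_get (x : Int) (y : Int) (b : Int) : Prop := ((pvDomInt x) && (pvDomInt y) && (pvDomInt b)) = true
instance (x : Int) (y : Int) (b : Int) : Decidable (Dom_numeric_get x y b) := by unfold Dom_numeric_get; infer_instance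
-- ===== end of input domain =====

-- B replaces A's fused inclusion-exclusion recurrence (with its two special boundary
-- loops) by build-indicator-then-two-directional-cumsum; same cost, plainer structure.

-- ===== PORT A =====
-- int(not (abs(i - j) < b))
def pvIdx (b i j : Int) : Int := if |i - j| < b then 0 else 1

-- tensor_check[i][j]  (reads in A are always in range on Pre_ inputs, so getD's
-- default is never consulted there)
def pvMget (m : List (List Int)) (i j : Nat) : Int := (m.getD i []).getD j 0

-- tensor_check[i][j] = v
def pvMset (m : List (List Int)) (i j : Nat) (v : Int) : List (List Int) :=
  m.modify i (fun r => r.set j v)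

-- body of A's first loop (first column)
def pvStep1 (b : Int) (t : List (List Int)) (i : Int) : List (List Int) :=
  pvMset t i.toNat 0 (pvMget t (i - 1).toNat 0 + pvIdx b i 0)

-- body of A's second loop (first row)
def pvStep2 (b : Int) (t : List (List Int)) (i : Int) : List (List Int) :=
  pvMset t 0 i.toNat (pvMget t 0 (i - 1).toNat + pvIdx b i 0)

-- body of A's inner nested loop
def pvStep3 (b : Int) (i : Int) (t : List (List Int)) (j : Int) : List (List Int) :=
  pvMset t i.toNat j.toNat
    (pvMget t i.toNat (j - 1).toNat + pvMget t (i - 1).toNat j.toNat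
      - pvMget t (i - 1).toNat (j - 1).toNat + pvIdx b i j)

-- A's outer nested loop body: for j in range(1, y): …
def pvRow3 (b y : Int) (t : List (List Int)) (i : Int) : List (List Int) :=
  (PySem.List.pyRange 1 y 1).foldl (pvStep3 b i) t

def numeric_get (x : Int) (y : Int) (b : Int) : List (List Int) :=
  let t0 := (PySem.List.pyRange 0 x 1).map
    (fun _ => (PySem.List.pyRange 0 y 1).map (fun _ => (0 : Int)))
  let t1 := (PySem.List.pyRange 1 x 1).foldl (pvStep1 b) t0
  let t2 := (PySem.List.pyRange 1 y 1).foldl (pvStep2 b) t1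
  (PySem.List.pyRange 1 x 1).foldl (pvRow3 b y) t2

-- ===== PORT B =====
-- helper prefix(row): running sum down a list
def pvPrefix (s : Int) : List Int → List Int
  | [] => []
  | v :: tl => (s + v) :: pvPrefix (s + v) tl

-- the column sweep: acc = [a + v for a, v in zip(acc, r)]; out.append(acc)
def pvColAcc (acc : List Int) : List (List Int) → List (List Int)
  | [] => []
  | r :: tl =>
    let acc' := List.zipWith (· + ·) acc r
    acc' :: pvColAcc acc' tl

def numeric_get_alt (x : Int) (y : Int) (b : Int) : List (List Int) :=
  let ind := (PySem.List.pyRange 0 x 1).map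
    (fun i => (PySem.List.pyRange 0 y 1).map (fun j => if b ≤ |i - j| then (1 : Int) else 0))
  let rows := ind.map (pvPrefix 0)
  pvColAcc (List.replicate (max y 0).toNat 0) rows   -- [0] * max(y, 0)

-- ===== PRECONDITION & SPEC =====
-- Pre_ excludes exactly the inputs on which A raises IndexError: the allocated matrix
-- has no cell the boundary loops write to (x ≥ 2 rows of length ≤ 0, or y ≥ 2 columns
-- of ≤ 0 rows).
def Pre_numeric_get (x : Int) (y : Int) (b : Int) : Prop :=
  ¬((2 ≤ x ∧ y ≤ 0) ∨ (2 ≤ y ∧ x ≤ 0))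
instance (x : Int) (y : Int) (b : Int) : Decidable (Pre_numeric_get x y b) := by
  unfold Pre_numeric_get; infer_instance

def pvWitness_numeric_get : Int × Int × Int := (3, 3, 2)

-- When b ≤ 0 and the table is nonempty, A never writes cell (0,0), so its whole table
-- omits the origin pair; B counts |0-0| ≥ b there, the intended prefix-sum value.
def D_numeric_get (x : Int) (y : Int) (b : Int) : Prop := b ≤ 0 ∧ 1 ≤ x ∧ 1 ≤ y
instance (x : Int) (y : Int) (b : Int) : Decidable (D_numeric_get x y b) := by
  unfold D_numeric_get; infer_instance

def Spec_numeric_get (x : Int) (y : Int) (b : Int) (out : List (List Int)) : Prop :=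
  ¬ D_numeric_get x y b → out = numeric_get_alt x y b
instance (x : Int) (y : Int) (b : Int) (out : List (List Int)) :
    Decidable (Spec_numeric_get x y b out) := by unfold Spec_numeric_get; infer_instance

def pvDiffWitness_numeric_get : Int × Int × Int := (1, 1, 0)
def pvDiffWitnessOut_numeric_get : (List (List Int)) × (List (List Int)) := ([[0]], [[1]])

-- ===== CLAIM (what is proved, stated in full; the proofs are below) =====
def Claim_unchanged_numeric_get : Prop := ∀ (x : Int) (y : Int) (b : Int),
  Dom_numeric_get x y b → Pre_numeric_get x y b →
    Spec_numeric_get x y b (numeric_get x y b)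
def Claim_changed_numeric_get : Prop :=
  Dom_numeric_get (pvDiffWitness_numeric_get.1) (pvDiffWitness_numeric_get.2.1) (pvDiffWitness_numeric_get.2.2) ∧
  Pre_numeric_get (pvDiffWitness_numeric_get.1) (pvDiffWitness_numeric_get.2.1) (pvDiffWitness_numeric_get.2.2) ∧
  D_numeric_get (pvDiffWitness_numeric_get.1) (pvDiffWitness_numeric_get.2.1) (pvDiffWitness_numeric_get.2.2) ∧
  numeric_get (pvDiffWitness_numeric_get.1) (pvDiffWitness_numeric_get.2.1) (pvDiffWitness_numeric_get.2.2) = pvDiffWitnessOut_numeric_get.1 ∧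
  numeric_get_alt (pvDiffWitness_numeric_get.1) (pvDiffWitness_numeric_get.2.1) (pvDiffWitness_numeric_get.2.2) = pvDiffWitnessOut_numeric_get.2 ∧
  pvDiffWitnessOut_numeric_get.1 ≠ pvDiffWitnessOut_numeric_get.2
def Claim_exact_numeric_get : Prop := ∀ (x : Int) (y : Int) (b : Int),
  Dom_numeric_get x y b → Pre_numeric_get x y b → D_numeric_get x y b →
    numeric_get x y b ≠ numeric_get_alt x y b

-- ===== LEMMAS AND PROOFS =====

-- the 0/1 indicator on Nat indices
def pvIndN (b : Int) (p q : Nat) : Int := if |(p : Int) - (q : Int)| < b then 0 else 1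

-- running (inclusive) prefix sum of h over 0..j
def pvAcc (h : Nat → Int) : Nat → Int
  | 0 => h 0
  | j + 1 => pvAcc h j + h (j + 1)

-- the true 2D prefix sum of the indicator
def pvT (b : Int) (i j : Nat) : Int := pvAcc (fun p => pvAcc (fun q => pvIndN b p q) j) i

-- A's table entry: the same minus the origin indicator
def pvGA (b : Int) (i j : Nat) : Int := pvT b i j - pvIndN b 0 0

def pvMat (n m : Nat) (f : Nat → Nat → Int) : List (List Int) :=
  (List.range n).map (fun i => (List.range m).map (f i))

theorem pvMat_congr (n m : Nat) (f g : Nat → Nat → Int)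
    (h : ∀ i < n, ∀ j < m, f i j = g i j) : pvMat n m f = pvMat n m g := by
  unfold pvMat
  refine List.map_congr_left (fun i hi => List.map_congr_left (fun j hj => ?_))
  exact h i (List.mem_range.mp hi) j (List.mem_range.mp hj)

theorem pvMget_pvMat (n m : Nat) (f : Nat → Nat → Int) (i j : Nat)
    (hi : i < n) (hj : j < m) : pvMget (pvMat n m f) i j = f i j := by
  unfold pvMget pvMat
  rw [PySem.List.getD_map_range _ _ _ _ hi, PySem.List.getD_map_range _ _ _ _ hj]

theorem pvMset_pvMat (n m : Nat) (f : Nat → Nat → Int) (i j : Nat) (v : Int) :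
    pvMset (pvMat n m f) i j v
      = pvMat n m (fun p q => if p = i ∧ q = j then v else f p q) := by
  unfold pvMset pvMat
  apply List.ext_getElem
  · simp
  · intro p hp hp'
    simp only [List.getElem_modify, List.getElem_map, List.getElem_range] at *
    simp only [List.length_map, List.length_range] at hp'
    by_cases hpi : i = p
    · subst hpi
      simp only []
      apply List.ext_getElem
      · simp
      · intro q hq hq'
        simp only [List.length_map, List.length_range] at hq'
        simp only [List.getElem_map, List.getElem_range]
        by_cases hqj : j = q
        · subst hqj; simp
        · simp [hqj, Ne.symm hqj]
    · simp only [if_neg hpi]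
      apply List.map_congr_left
      intro q _
      have : ¬(p = i ∧ q = j) := fun h => hpi h.1.symm
      simp [this]

theorem pvAcc_succ (h : Nat → Int) (j : Nat) : pvAcc h (j + 1) = pvAcc h j + h (j + 1) := rfl

theorem pvT_zero (b : Int) : pvT b 0 0 = pvIndN b 0 0 := rfl

theorem pvT_col (b : Int) (i : Nat) : pvT b (i + 1) 0 = pvT b i 0 + pvIndN b (i + 1) 0 := rfl

theorem pvT_row (b : Int) (j : Nat) : pvT b 0 (j + 1) = pvT b 0 j + pvIndN b 0 (j + 1) := by
  simp [pvT, pvAcc]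

theorem pvT_main (b : Int) (i j : Nat) :
    pvT b (i + 1) (j + 1)
      = pvT b (i + 1) j + pvT b i (j + 1) - pvT b i j + pvIndN b (i + 1) (j + 1) := by
  simp only [pvT, pvAcc_succ]
  ring

theorem pvGA_zero (b : Int) : pvGA b 0 0 = 0 := by simp [pvGA, pvT_zero]

theorem pvGA_col (b : Int) (i : Nat) :
    pvGA b (i + 1) 0 = pvGA b i 0 + pvIndN b (i + 1) 0 := by
  simp [pvGA, pvT_col]; ring

theorem pvGA_row (b : Int) (j : Nat) :
    pvGA b 0 (j + 1) = pvGA b 0 j + pvIndN b 0 (j + 1) := by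
  simp [pvGA, pvT_row]; ring

theorem pvGA_main (b : Int) (i j : Nat) :
    pvGA b (i + 1) (j + 1)
      = pvGA b (i + 1) j + pvGA b i (j + 1) - pvGA b i j + pvIndN b (i + 1) (j + 1) := by
  simp [pvGA, pvT_main]; ring

-- ---------- characterisation of A ----------

theorem loop1_inv (b : Int) (n m k : Nat) (hm : 0 < m) (hk : k < n) :
    ((List.range k).map (fun κ : Nat => (1 : Int) + (κ : Int))).foldl (pvStep1 b)
        (pvMat n m (fun _ _ => 0))
      = pvMat n m (fun p q => if q = 0 ∧ p ≤ k then pvGA b p 0 else 0) := by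
  induction k with
  | zero =>
    simp only [List.range_zero, List.map_nil, List.foldl_nil]
    apply pvMat_congr; intro p _ q _
    by_cases h : q = 0 ∧ p ≤ 0
    · obtain ⟨h1, h2⟩ := h
      have hp : p = 0 := Nat.le_zero.mp h2
      simp [h1, hp, pvGA_zero]
    · rw [if_neg h]
  | succ k ih =>
    rw [List.range_succ, List.map_append, List.foldl_append,
        ih (Nat.lt_of_succ_lt hk)]
    simp only [List.map_cons, List.map_nil, List.foldl_cons, List.foldl_nil]
    unfold pvStep1
    have h1 : ((1 : Int) + (k : Int)).toNat = k + 1 := by omega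
    have h2 : ((1 : Int) + (k : Int) - 1).toNat = k := by omega
    rw [h1, h2, pvMget_pvMat n m _ k 0 (Nat.lt_of_succ_lt hk) hm, pvMset_pvMat]
    apply pvMat_congr; intro p hp q hq
    have hidx : pvIdx b (1 + (k : Int)) 0 = pvIndN b (k + 1) 0 := by
      unfold pvIdx pvIndN; push_cast; ring_nf
    by_cases hpq : p = k + 1 ∧ q = 0
    · obtain ⟨hp1, hq1⟩ := hpq
      subst hp1; subst hq1
      simp [hidx, pvGA_col]
    · simp only [if_neg hpq]
      by_cases hq0 : q = 0
      · subst hq0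
        by_cases hpk : p ≤ k
        · simp [hpk, Nat.le_succ_of_le hpk]
        · have : ¬ p ≤ k + 1 := by
            intro h; exact hpq ⟨by omega, rfl⟩
          simp [hpk, this]
      · simp [hq0]

theorem loop2_inv (b : Int) (n m k : Nat) (hn : 0 < n) (hk : k < m) :
    ((List.range k).map (fun κ : Nat => (1 : Int) + (κ : Int))).foldl (pvStep2 b)
        (pvMat n m (fun p q => if q = 0 then pvGA b p 0 else 0))
      = pvMat n m (fun p q =>
          if q = 0 then pvGA b p 0 else if p = 0 ∧ q ≤ k then pvGA b 0 q else 0) := by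
  induction k with
  | zero =>
    simp only [List.range_zero, List.map_nil, List.foldl_nil]
    apply pvMat_congr; intro p _ q _
    by_cases hq : q = 0
    · simp [hq]
    · have : ¬(p = 0 ∧ q ≤ 0) := fun h => hq (Nat.le_zero.mp h.2)
      simp [hq]
  | succ k ih =>
    rw [List.range_succ, List.map_append, List.foldl_append,
        ih (Nat.lt_of_succ_lt hk)]
    simp only [List.map_cons, List.map_nil, List.foldl_cons, List.foldl_nil]
    unfold pvStep2
    have h1 : ((1 : Int) + (k : Int)).toNat = k + 1 := by omega
    have h2 : ((1 : Int) + (k : Int) - 1).toNat = k := by omega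
    rw [h1, h2, pvMget_pvMat n m _ 0 k hn (Nat.lt_of_succ_lt hk), pvMset_pvMat]
    have hval : (if (k : Nat) = 0 then pvGA b 0 0
        else if (0 : Nat) = 0 ∧ k ≤ k then pvGA b 0 k else 0) = pvGA b 0 k := by
      by_cases hk0 : (k : Nat) = 0
      · subst hk0; simp
      · simp [hk0]
    rw [hval]
    apply pvMat_congr; intro p hp q hq
    have hidx : pvIdx b (1 + (k : Int)) 0 = pvIndN b 0 (k + 1) := by
      simp only [pvIdx, pvIndN]
      have : |(1 : Int) + (k : Int) - 0| = |((0 : Nat) : Int) - (((k : Nat) + 1 : Nat) : Int)| := by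
        push_cast; rw [abs_sub_comm]; ring_nf
      rw [this]
    by_cases hpq : p = 0 ∧ q = k + 1
    · obtain ⟨hp1, hq1⟩ := hpq
      subst hp1; subst hq1
      simp [hidx, pvGA_row]
    · simp only [if_neg hpq]
      by_cases hq0 : q = 0
      · simp [hq0]
      · simp only [if_neg hq0]
        by_cases hp0 : p = 0
        · subst hp0
          by_cases hqk : q ≤ k
          · simp [hqk, Nat.le_succ_of_le hqk]
          · have : ¬ q ≤ k + 1 := by intro h; exact hpq ⟨rfl, by omega⟩
            simp [hqk, this]
        · simp [hp0]

-- inner loop of the nested pass, row index k+1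
theorem loop3_inner_inv (b : Int) (n m k l : Nat) (hk : k + 1 < n) (hl : l < m) :
    ((List.range l).map (fun κ : Nat => (1 : Int) + (κ : Int))).foldl (pvStep3 b (1 + (k : Int)))
        (pvMat n m (fun p q =>
          if p ≤ k then pvGA b p q else if q = 0 then pvGA b p 0 else 0))
      = pvMat n m (fun p q =>
          if p ≤ k then pvGA b p q
          else if p = k + 1 ∧ q ≤ l then pvGA b p q
          else if q = 0 then pvGA b p 0 else 0) := by
  induction l with
  | zero =>
    simp only [List.range_zero, List.map_nil, List.foldl_nil]
    apply pvMat_congr; intro p _ q _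
    by_cases hpk : p ≤ k
    · simp [hpk]
    · simp only [if_neg hpk]
      by_cases hpq : p = k + 1 ∧ q ≤ 0
      · obtain ⟨hp1, hq1⟩ := hpq
        have hq0 : q = 0 := Nat.le_zero.mp hq1
        subst hq0; simp [hp1]
      · rw [if_neg hpq]
  | succ l ih =>
    rw [List.range_succ, List.map_append, List.foldl_append,
        ih (Nat.lt_of_succ_lt hl)]
    simp only [List.map_cons, List.map_nil, List.foldl_cons, List.foldl_nil]
    unfold pvStep3
    have h1 : ((1 : Int) + (k : Int)).toNat = k + 1 := by omega
    have h2 : ((1 : Int) + (k : Int) - 1).toNat = k := by omega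
    have h3 : ((1 : Int) + (l : Int)).toNat = l + 1 := by omega
    have h4 : ((1 : Int) + (l : Int) - 1).toNat = l := by omega
    rw [h1, h2, h3, h4,
        pvMget_pvMat n m _ (k + 1) l hk (Nat.lt_of_succ_lt hl),
        pvMget_pvMat n m _ k (l + 1) (by omega) hl,
        pvMget_pvMat n m _ k l (by omega) (Nat.lt_of_succ_lt hl),
        pvMset_pvMat]
    have e1 : (if k + 1 ≤ k then pvGA b (k + 1) l
        else if k + 1 = k + 1 ∧ l ≤ l then pvGA b (k + 1) l
        else if l = 0 then pvGA b (k + 1) 0 else 0) = pvGA b (k + 1) l := by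
      simp
    have e2 : (if k ≤ k then pvGA b k (l + 1)
        else if k = k + 1 ∧ l + 1 ≤ l then pvGA b k (l + 1)
        else if l + 1 = 0 then pvGA b k 0 else 0) = pvGA b k (l + 1) := by simp
    have e3 : (if k ≤ k then pvGA b k l
        else if k = k + 1 ∧ l ≤ l then pvGA b k l
        else if l = 0 then pvGA b k 0 else 0) = pvGA b k l := by simp
    rw [e1, e2, e3]
    have hidx : pvIdx b (1 + (k : Int)) (1 + (l : Int)) = pvIndN b (k + 1) (l + 1) := by
      simp only [pvIdx, pvIndN]
      have : |(1 : Int) + (k : Int) - (1 + (l : Int))|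
          = |(((k : Nat) + 1 : Nat) : Int) - (((l : Nat) + 1 : Nat) : Int)| := by
        push_cast; ring_nf
      rw [this]
    apply pvMat_congr; intro p hp q hq
    by_cases hpq : p = k + 1 ∧ q = l + 1
    · obtain ⟨hp1, hq1⟩ := hpq
      subst hp1; subst hq1
      simp [hidx, pvGA_main]
    · simp only [if_neg hpq]
      by_cases hpk : p ≤ k
      · simp [hpk]
      · simp only [if_neg hpk]
        by_cases hp1 : p = k + 1
        · subst hp1
          by_cases hql : q ≤ l
          · simp [hql, Nat.le_succ_of_le hql]
          · have : ¬ q ≤ l + 1 := by intro h; exact hpq ⟨rfl, by omega⟩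
            simp [hql, this]
        · have h5 : ¬ (p = k + 1 ∧ q ≤ l) := fun h => hp1 h.1
          have h6 : ¬ (p = k + 1 ∧ q ≤ l + 1) := fun h => hp1 h.1
          simp [h5, h6]

theorem loop3_outer_inv (b : Int) (y : Int) (n m k : Nat) (hm : 0 < m)
    (hy : y.toNat = m) (hk : k < n) :
    ((List.range k).map (fun κ : Nat => (1 : Int) + (κ : Int))).foldl (pvRow3 b y)
        (pvMat n m (fun p q =>
          if q = 0 then pvGA b p 0 else if p = 0 then pvGA b 0 q else 0))
      = pvMat n m (fun p q =>
          if p ≤ k then pvGA b p q else if q = 0 then pvGA b p 0 else 0) := by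
  induction k with
  | zero =>
    simp only [List.range_zero, List.map_nil, List.foldl_nil]
    apply pvMat_congr; intro p _ q _
    by_cases hq : q = 0
    · subst hq
      by_cases hp : p ≤ 0
      · have : p = 0 := Nat.le_zero.mp hp; subst this; simp
      · simp [hp]
    · by_cases hp : p = 0
      · subst hp; simp [hq]
      · have : ¬ p ≤ 0 := fun h => hp (Nat.le_zero.mp h)
        simp [hq, hp, this]
  | succ k ih =>
    rw [List.range_succ, List.map_append, List.foldl_append,
        ih (Nat.lt_of_succ_lt hk)]
    simp only [List.map_cons, List.map_nil, List.foldl_cons, List.foldl_nil]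
    unfold pvRow3
    rw [PySem.List.pyRange_one]
    have hm1 : (y - 1).toNat = m - 1 := by omega
    rw [hm1, loop3_inner_inv b n m k (m - 1) hk (by omega)]
    apply pvMat_congr; intro p hp q hq
    by_cases hpk : p ≤ k
    · simp [hpk, Nat.le_succ_of_le hpk]
    · simp only [if_neg hpk]
      by_cases hp1 : p = k + 1
      · have hq1 : q ≤ m - 1 := by omega
        have hp2 : p ≤ k + 1 := by omega
        simp [hp1, hq1]
      · have h5 : ¬ p ≤ k + 1 := by omega
        have h6 : ¬ (p = k + 1 ∧ q ≤ m - 1) := fun h => hp1 h.1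
        simp [h5, h6]

-- full characterisation of A
theorem A_char (x y b : Int) (hx : 0 < x) (hy : 0 < y) :
    numeric_get x y b = pvMat x.toNat y.toNat (pvGA b) := by
  have hn : 0 < x.toNat := by omega
  have hm : 0 < y.toNat := by omega
  unfold numeric_get
  rw [PySem.List.pyRange_one 0 x, PySem.List.pyRange_one 1 x, PySem.List.pyRange_one 1 y,
      PySem.List.pyRange_one 0 y]
  have ex0 : (x - 0).toNat = x.toNat := by omega
  have ey0 : (y - 0).toNat = y.toNat := by omega
  have ex1 : (x - 1).toNat = x.toNat - 1 := by omega
  have ey1 : (y - 1).toNat = y.toNat - 1 := by omega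
  rw [ex0, ey0, ex1, ey1]
  dsimp only
  have ht0 : ((List.range x.toNat).map (fun k : Nat => (0 : Int) + (k : Int))).map
        (fun _ => ((List.range y.toNat).map (fun k : Nat => (0 : Int) + (k : Int))).map
          (fun _ => (0 : Int)))
      = pvMat x.toNat y.toNat (fun _ _ => 0) := by
    unfold pvMat; rw [List.map_map, List.map_map]; rfl
  rw [ht0, loop1_inv b x.toNat y.toNat (x.toNat - 1) hm (by omega)]
  have c1 : pvMat x.toNat y.toNat
        (fun p q => if q = 0 ∧ p ≤ x.toNat - 1 then pvGA b p 0 else 0)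
      = pvMat x.toNat y.toNat (fun p q => if q = 0 then pvGA b p 0 else 0) := by
    apply pvMat_congr; intro p hp q _
    by_cases hq : q = 0
    · have hp1 : p ≤ x.toNat - 1 := by omega
      simp [hq, hp1]
    · simp [hq]
  rw [c1, loop2_inv b x.toNat y.toNat (y.toNat - 1) hn (by omega)]
  have c2 : pvMat x.toNat y.toNat
        (fun p q => if q = 0 then pvGA b p 0
          else if p = 0 ∧ q ≤ y.toNat - 1 then pvGA b 0 q else 0)
      = pvMat x.toNat y.toNat
        (fun p q => if q = 0 then pvGA b p 0 else if p = 0 then pvGA b 0 q else 0) := by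
    apply pvMat_congr; intro p _ q hq
    by_cases hq0 : q = 0
    · simp [hq0]
    · by_cases hp : p = 0
      · have : q ≤ y.toNat - 1 := by omega
        simp [hq0, hp, this]
      · simp [hq0, hp]
  rw [c2, loop3_outer_inv b y x.toNat y.toNat (x.toNat - 1) hm rfl (by omega)]
  apply pvMat_congr; intro p hp q _
  have : p ≤ x.toNat - 1 := by omega
  simp [this]

-- ---------- characterisation of B ----------

theorem pvAcc_shift (h : Nat → Int) (j : Nat) :
    h 0 + pvAcc (fun k => h (k + 1)) j = pvAcc h (j + 1) := by
  induction j with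
  | zero => rfl
  | succ j ih => rw [pvAcc_succ, pvAcc_succ, ← ih]; ring

theorem pvPrefix_range (m : Nat) (s : Int) (h : Nat → Int) :
    pvPrefix s ((List.range m).map h)
      = (List.range m).map (fun j => s + pvAcc h j) := by
  induction m generalizing s h with
  | zero => rfl
  | succ m ih =>
    rw [List.range_succ_eq_map]
    simp only [List.map_cons, List.map_map]
    rw [pvPrefix]
    rw [show ((List.range m).map (h ∘ Nat.succ)) = (List.range m).map (fun k => h (k + 1)) from rfl]
    rw [ih (s + h 0) (fun k => h (k + 1))]
    rw [show ((fun j => s + pvAcc h j) ∘ Nat.succ) = fun j => s + pvAcc h (j + 1) from rfl]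
    congr 1
    refine List.map_congr_left (fun j _ => ?_)
    have := pvAcc_shift h j
    linarith

theorem pvZip_map {l : List Nat} (a c : Nat → Int) :
    List.zipWith (· + ·) (l.map a) (l.map c) = l.map (fun j => a j + c j) := by
  induction l with
  | nil => rfl
  | cons hd tl ih => simp [ih]

theorem pvColAcc_range (n m : Nat) (a : Nat → Int) (r : Nat → Nat → Int) :
    pvColAcc ((List.range m).map a)
        ((List.range n).map (fun i => (List.range m).map (r i)))
      = (List.range n).map (fun i =>
          (List.range m).map (fun j => a j + pvAcc (fun p => r p j) i)) := by
  induction n generalizing a r with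
  | zero => rfl
  | succ n ih =>
    rw [List.range_succ_eq_map]
    simp only [List.map_cons, List.map_map]
    rw [pvColAcc, pvZip_map]
    rw [show ((List.range n).map ((fun i => (List.range m).map (r i)) ∘ Nat.succ))
        = (List.range n).map (fun i => (List.range m).map (fun j => r (i + 1) j)) from by
      simp [Function.comp]]
    rw [ih (fun j => a j + r 0 j) (fun i j => r (i + 1) j)]
    rw [show ((fun i => (List.range m).map (fun j => a j + pvAcc (fun p => r p j) i)) ∘ Nat.succ)
        = fun i => (List.range m).map (fun j => a j + pvAcc (fun p => r p j) (i + 1)) from rfl]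
    congr 1
    refine List.map_congr_left (fun i _ => ?_)
    refine List.map_congr_left (fun j _ => ?_)
    have := pvAcc_shift (fun p => r p j) i
    linarith

theorem pvIndN_alt (b : Int) (i j : Nat) :
    (if b ≤ |(0 + (i : Int)) - (0 + (j : Int))| then (1 : Int) else 0) = pvIndN b i j := by
  unfold pvIndN
  rw [zero_add, zero_add]
  rcases lt_or_ge (|(i : Int) - (j : Int)|) b with h | h
  · rw [if_neg (not_le.mpr h), if_pos h]
  · rw [if_pos h, if_neg (not_lt.mpr h)]

theorem B_char (x y b : Int) :
    numeric_get_alt x y b = pvMat x.toNat y.toNat (pvT b) := by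
  unfold numeric_get_alt
  rw [PySem.List.pyRange_one 0 x, PySem.List.pyRange_one 0 y]
  have ex0 : (x - 0).toNat = x.toNat := by omega
  have ey0 : (y - 0).toNat = y.toNat := by omega
  rw [ex0, ey0]
  dsimp only
  rw [List.map_map, List.map_map]
  have hrows : (List.range x.toNat).map
        ((pvPrefix 0 ∘ fun i : Int =>
          ((List.range y.toNat).map (fun k : Nat => (0 : Int) + (k : Int))).map
            (fun j : Int => if b ≤ |i - j| then (1 : Int) else 0)) ∘
          fun k : Nat => (0 : Int) + (k : Int))
      = (List.range x.toNat).map (fun i =>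
          (List.range y.toNat).map (fun j => 0 + pvAcc (fun q => pvIndN b i q) j)) := by
    refine List.map_congr_left (fun i _ => ?_)
    show pvPrefix 0 (((List.range y.toNat).map (fun k : Nat => (0 : Int) + (k : Int))).map
        (fun j : Int => if b ≤ |(0 + (i : Int)) - j| then (1 : Int) else 0)) = _
    rw [List.map_map]
    rw [show ((fun j : Int => if b ≤ |(0 + (i : Int)) - j| then (1 : Int) else 0) ∘
          fun k : Nat => (0 : Int) + (k : Int))
        = fun j : Nat => pvIndN b i j from funext (fun j => pvIndN_alt b i j)]
    exact pvPrefix_range y.toNat 0 (fun q => pvIndN b i q)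
  rw [hrows]
  have hrep : List.replicate (max y 0).toNat (0 : Int)
      = (List.range y.toNat).map (fun _ => (0 : Int)) := by
    have : (max y 0).toNat = y.toNat := by omega
    rw [this]
    simp
  rw [hrep, pvColAcc_range x.toNat y.toNat (fun _ => 0)
        (fun i j => 0 + pvAcc (fun q => pvIndN b i q) j)]
  apply pvMat_congr; intro p hp q hq
  unfold pvT
  rw [show (fun i : Nat => (0 : Int) + pvAcc (fun q' => pvIndN b i q') q)
      = fun i : Nat => pvAcc (fun q' => pvIndN b i q') q from funext (fun i => by ring)]
  ring

-- ---------- degenerate shapes ----------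

theorem A_empty (x y b : Int) (hx : x ≤ 0) (hy : y ≤ 1) : numeric_get x y b = [] := by
  unfold numeric_get
  rw [PySem.List.pyRange_one 0 x, PySem.List.pyRange_one 1 x, PySem.List.pyRange_one 1 y]
  have e1 : (x - 0).toNat = 0 := by omega
  have e2 : (x - 1).toNat = 0 := by omega
  have e3 : (y - 1).toNat = 0 := by omega
  rw [e1, e2, e3]
  simp

theorem A_one_empty (y b : Int) (hy : y ≤ 0) : numeric_get 1 y b = [[]] := by
  unfold numeric_get
  rw [PySem.List.pyRange_one 0 1, PySem.List.pyRange_one 1 1, PySem.List.pyRange_one 1 y,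
      PySem.List.pyRange_one 0 y]
  have e3 : (y - 1).toNat = 0 := by omega
  have e4 : (y - 0).toNat = 0 := by omega
  rw [e3, e4]
  simp

-- ===== VERDICT (by name: the statement is the Claim_ definition above) =====
theorem numeric_get_spec : Claim_unchanged_numeric_get := by
  unfold Claim_unchanged_numeric_get
  intro x y b _ hpre
  unfold Spec_numeric_get
  intro hnD
  unfold Pre_numeric_get at hpre
  unfold D_numeric_get at hnD
  rw [B_char]
  by_cases hx : 0 < x
  · by_cases hy : 0 < y
    · rw [A_char x y b hx hy]
      apply pvMat_congr; intro p _ q _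
      unfold pvGA
      have hb : 1 ≤ b := by
        by_contra h
        exact hnD ⟨by omega, by omega, by omega⟩
      have h0 : pvIndN b 0 0 = 0 := by
        unfold pvIndN
        rw [if_pos (by simpa using (by omega : (0 : Int) < b))]
      rw [h0]; ring
    · have hx1 : x = 1 := by omega
      subst hx1
      rw [A_one_empty y b (by omega)]
      have e1 : ((1 : Int)).toNat = 1 := rfl
      have e2 : y.toNat = 0 := by omega
      rw [e1, e2]
      rfl
  · rw [A_empty x y b (by omega) (by omega)]
    have : x.toNat = 0 := by omega
    rw [this]
    rfl

theorem numeric_get_changed : Claim_changed_numeric_get := by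
  unfold Claim_changed_numeric_get; decide

theorem numeric_get_tight : Claim_exact_numeric_get := by
  unfold Claim_exact_numeric_get
  intro x y b _ _ hD
  obtain ⟨hb, hx, hy⟩ := hD
  rw [A_char x y b (by omega) (by omega), B_char]
  intro heq
  have h00 := congrArg (fun l => pvMget l 0 0) heq
  simp only at h00
  rw [pvMget_pvMat x.toNat y.toNat _ 0 0 (by omega) (by omega),
      pvMget_pvMat x.toNat y.toNat _ 0 0 (by omega) (by omega)] at h00
  unfold pvGA at h00
  have h1 : pvIndN b 0 0 = 1 := by
    unfold pvIndN
    rw [if_neg (by simpa using (by omega : ¬ (0 : Int) < b))]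
  rw [h1] at h00
  omega
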